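-- pv_equiv track=rewrite | github.com/franchuterivera/automlbenchmark | plotter.py | beautify_node_name
-- ===== SOURCE A (Python) =====
-- MAPPING = {
--     "None": 'autosklearn',
--
--     'autosklearnBBCScoreEnsembleALLIB': 'A: BBC Prefilter with InBag ES with InBag Avg statistic',
--     "autosklearnBBCScoreEnsemble": 'A: BBC Prefilter with OOB ES with InBag Avg statistic',
--     "autosklearnBBCScoreEnsembleAVGMDEV": 'A: BBC Prefilter with OOB ES with InBag Minimum statistic',
--     "autosklearnBBCScoreEnsemblePercentile": 'A: BBC Prefilter with OOB ES with InBag 25 percentile',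
--
--     "autosklearnBBCEnsembleSelection": 'B: Avg of B-times-ES with InBag / best model preselect',
--     "autosklearnBBCEnsembleSelection_ES": 'B: Avg of B-times-ES with InBag / best model preselect / Early Stop',
--     "autosklearnBBCEnsembleSelectionNoPreSelect": 'B: Avg of B-times-ES with InBag',
--     "autosklearnBBCEnsembleSelectionNoPreSelect_ES": 'B: Avg of B-times-ES with InBag / Early Stop',
--     "autosklearnBBCEnsembleSelectionPreSelectInESRegularizedEnd": 'B: Avg of B-times-ES with InBag / Regularized',
--     "autosklearnBBCEnsembleSelectionPreSelectInESRegularizedEnd_ES": 'B: Avg of B-times-ES with InBag / Regularized /Early Stop',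
--
--     "autosklearnBBCScoreEnsembleMAX": 'C: Ensemble B winners of B bootstraps',
--     "autosklearnBBCScoreEnsembleMAX_ES": 'C: Ensemble B winners of B bootstraps / Early Stop',
--     "autosklearnBBCScoreEnsembleMAXWinner": 'C: Ensemble Selection with Max-Bag-Winner addition',
--     "autosklearnBBCScoreEnsembleMAXWinner_ES": 'C: Ensemble Selection with Max-Bag-Winner addition / Early Stop',
--     "autosklearnBagging": 'Caruana(2004)  Bagging',
--     "bagging": 'Caruana(2004)  Bagging',
-- }
--
-- def beautify_node_name(name: str, separator=' ') -> str:
--     """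
--     Just makes a name nicer to plot in graph viz
--     """
--     # Some pre checks
--     if 'None_' in name: return 'autosklearn'
--     if 'bagging_' in name: return 'bagging'
--     # Mapping hold translations to make plotting better
--     for key in sorted(MAPPING.keys(), key=len, reverse=True):
--         if key in name:
--             name = name.replace(key, MAPPING[key])
--             break
--     name = name.replace("_", separator)
--     return name
-- ===== SOURCE B (Python) =====
-- MAPPING = {
--     "None": 'autosklearn',
--
--     'autosklearnBBCScoreEnsembleALLIB': 'A: BBC Prefilter with InBag ES with InBag Avg statistic',
--     "autosklearnBBCScoreEnsemble": 'A: BBC Prefilter with OOB ES with InBag Avg statistic',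
--     "autosklearnBBCScoreEnsembleAVGMDEV": 'A: BBC Prefilter with OOB ES with InBag Minimum statistic',
--     "autosklearnBBCScoreEnsemblePercentile": 'A: BBC Prefilter with OOB ES with InBag 25 percentile',
--
--     "autosklearnBBCEnsembleSelection": 'B: Avg of B-times-ES with InBag / best model preselect',
--     "autosklearnBBCEnsembleSelection_ES": 'B: Avg of B-times-ES with InBag / best model preselect / Early Stop',
--     "autosklearnBBCEnsembleSelectionNoPreSelect": 'B: Avg of B-times-ES with InBag',
--     "autosklearnBBCEnsembleSelectionNoPreSelect_ES": 'B: Avg of B-times-ES with InBag / Early Stop',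
--     "autosklearnBBCEnsembleSelectionPreSelectInESRegularizedEnd": 'B: Avg of B-times-ES with InBag / Regularized',
--     "autosklearnBBCEnsembleSelectionPreSelectInESRegularizedEnd_ES": 'B: Avg of B-times-ES with InBag / Regularized /Early Stop',
--
--     "autosklearnBBCScoreEnsembleMAX": 'C: Ensemble B winners of B bootstraps',
--     "autosklearnBBCScoreEnsembleMAX_ES": 'C: Ensemble B winners of B bootstraps / Early Stop',
--     "autosklearnBBCScoreEnsembleMAXWinner": 'C: Ensemble Selection with Max-Bag-Winner addition',
--     "autosklearnBBCScoreEnsembleMAXWinner_ES": 'C: Ensemble Selection with Max-Bag-Winner addition / Early Stop',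
--     "autosklearnBagging": 'Caruana(2004)  Bagging',
--     "bagging": 'Caruana(2004)  Bagging',
-- }
--
--
-- def beautify_node_name(name: str, separator=' ') -> str:
--     """
--     Just makes a name nicer to plot in graph viz
--     """
--     if 'None_' in name:
--         return 'autosklearn'
--     if 'bagging_' in name:
--         return 'bagging'
--     # single pass: keep the longest matching key (first one in dict order on ties)
--     best = None
--     for key in MAPPING:
--         if key in name and (best is None or len(best) < len(key)):
--             best = key
--     if best is not None:
--         name = name.replace(best, MAPPING[best])
--     return name.replace('_', separator)
-- ===== Notes on version B (the rewrite author's own statement) =====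
-- stated objective: simpler
-- what changed: B drops A's sort of all mapping keys followed by a first-match scan and instead makes a single running-max pass over the keys in dict order, keeping the longest key that occurs in the name (first one on ties), then replaces it.
import Mathlib
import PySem

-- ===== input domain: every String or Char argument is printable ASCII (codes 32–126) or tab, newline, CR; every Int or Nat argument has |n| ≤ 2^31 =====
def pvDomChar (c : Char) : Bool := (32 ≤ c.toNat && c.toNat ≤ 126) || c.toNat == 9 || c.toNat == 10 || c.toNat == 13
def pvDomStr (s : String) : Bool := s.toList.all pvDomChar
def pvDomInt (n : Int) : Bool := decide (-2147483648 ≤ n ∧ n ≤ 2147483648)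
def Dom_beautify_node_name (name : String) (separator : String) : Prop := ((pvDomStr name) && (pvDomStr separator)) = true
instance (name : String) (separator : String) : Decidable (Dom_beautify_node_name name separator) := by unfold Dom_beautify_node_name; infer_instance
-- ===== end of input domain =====

-- B replaces A's sort-all-keys-then-scan-for-first-match by a single running-max pass
-- over the keys that keeps the longest matching key (objective: simpler, one pass, no sort).

-- ===== PORT A =====
-- the module-level MAPPING dict (shared constant of both Pythons)
def pvMapping : PySem.Dict String String := PySem.Dict.ofList [
  ("None", "autosklearn"),
  ("autosklearnBBCScoreEnsembleALLIB", "A: BBC Prefilter with InBag ES with InBag Avg statistic"),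
  ("autosklearnBBCScoreEnsemble", "A: BBC Prefilter with OOB ES with InBag Avg statistic"),
  ("autosklearnBBCScoreEnsembleAVGMDEV", "A: BBC Prefilter with OOB ES with InBag Minimum statistic"),
  ("autosklearnBBCScoreEnsemblePercentile", "A: BBC Prefilter with OOB ES with InBag 25 percentile"),
  ("autosklearnBBCEnsembleSelection", "B: Avg of B-times-ES with InBag / best model preselect"),
  ("autosklearnBBCEnsembleSelection_ES", "B: Avg of B-times-ES with InBag / best model preselect / Early Stop"),
  ("autosklearnBBCEnsembleSelectionNoPreSelect", "B: Avg of B-times-ES with InBag"),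
  ("autosklearnBBCEnsembleSelectionNoPreSelect_ES", "B: Avg of B-times-ES with InBag / Early Stop"),
  ("autosklearnBBCEnsembleSelectionPreSelectInESRegularizedEnd", "B: Avg of B-times-ES with InBag / Regularized"),
  ("autosklearnBBCEnsembleSelectionPreSelectInESRegularizedEnd_ES", "B: Avg of B-times-ES with InBag / Regularized /Early Stop"),
  ("autosklearnBBCScoreEnsembleMAX", "C: Ensemble B winners of B bootstraps"),
  ("autosklearnBBCScoreEnsembleMAX_ES", "C: Ensemble B winners of B bootstraps / Early Stop"),
  ("autosklearnBBCScoreEnsembleMAXWinner", "C: Ensemble Selection with Max-Bag-Winner addition"),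
  ("autosklearnBBCScoreEnsembleMAXWinner_ES", "C: Ensemble Selection with Max-Bag-Winner addition / Early Stop"),
  ("autosklearnBagging", "Caruana(2004)  Bagging"),
  ("bagging", "Caruana(2004)  Bagging")]

-- A's 'for key in sorted(...): if key in name: name = name.replace(...); break'
-- (MAPPING[key] ported as getD with an unreachable default: key is always a dict key)
def pvLoopA : List String → String → String
  | [], n => n
  | k :: rest, n =>
    if PySem.Str.isIn k n then PySem.Str.replace n k (pvMapping.getD k "") else pvLoopA rest n

def beautify_node_name (name : String) (separator : String) : String :=
  if PySem.Str.isIn "None_" name then "autosklearn"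
  else if PySem.Str.isIn "bagging_" name then "bagging"
  else
    PySem.Str.replace (pvLoopA (PySem.List.sorted pvMapping.keys (fun k => PySem.Str.len k) true) name) "_" separator

-- ===== PORT B =====
-- B's single pass: 'for key in MAPPING: if key in name and (best is None or len(best) < len(key)): best = key'
def pvBest (name : String) : Option String :=
  pvMapping.keys.foldl (fun best k =>
    if PySem.Str.isIn k name &&
        (match best with
         | none => true
         | some b => decide (PySem.Str.len b < PySem.Str.len k))
    then some k else best) none

def beautify_node_name_alt (name : String) (separator : String) : String :=
  if PySem.Str.isIn "None_" name then "autosklearn"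
  else if PySem.Str.isIn "bagging_" name then "bagging"
  else
    PySem.Str.replace
      (match pvBest name with
       | some k => PySem.Str.replace name k (pvMapping.getD k "")
       | none => name) "_" separator

-- ===== PRECONDITION & SPEC =====
def Spec_beautify_node_name (name : String) (separator : String) (out : String) : Prop := out = beautify_node_name_alt name separator
instance (name : String) (separator : String) (out : String) : Decidable (Spec_beautify_node_name name separator out) := by unfold Spec_beautify_node_name; infer_instance

-- ===== CLAIM (what is proved, stated in full; the proofs are below) =====
def Claim_equal_beautify_node_name : Prop := ∀ (name : String) (separator : String), Dom_beautify_node_name name separator → Spec_beautify_node_name name separator (beautify_node_name name separator)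

-- ===== LEMMAS AND PROOFS =====

-- the keys in longest-first (stable) order, as A's sorted(...) produces them
def pvSortedKeys : List String := [
    "autosklearnBBCEnsembleSelectionPreSelectInESRegularizedEnd_ES",
    "autosklearnBBCEnsembleSelectionPreSelectInESRegularizedEnd",
    "autosklearnBBCEnsembleSelectionNoPreSelect_ES",
    "autosklearnBBCEnsembleSelectionNoPreSelect",
    "autosklearnBBCScoreEnsembleMAXWinner_ES",
    "autosklearnBBCScoreEnsemblePercentile",
    "autosklearnBBCScoreEnsembleMAXWinner",
    "autosklearnBBCScoreEnsembleAVGMDEV",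
    "autosklearnBBCEnsembleSelection_ES",
    "autosklearnBBCScoreEnsembleMAX_ES",
    "autosklearnBBCScoreEnsembleALLIB",
    "autosklearnBBCEnsembleSelection",
    "autosklearnBBCScoreEnsembleMAX",
    "autosklearnBBCScoreEnsemble",
    "autosklearnBagging",
    "bagging",
    "None"]

-- the keys in dict (insertion) order, as B's 'for key in MAPPING' visits them
def pvKeysList : List String := [
    "None",
    "autosklearnBBCScoreEnsembleALLIB",
    "autosklearnBBCScoreEnsemble",
    "autosklearnBBCScoreEnsembleAVGMDEV",
    "autosklearnBBCScoreEnsemblePercentile",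
    "autosklearnBBCEnsembleSelection",
    "autosklearnBBCEnsembleSelection_ES",
    "autosklearnBBCEnsembleSelectionNoPreSelect",
    "autosklearnBBCEnsembleSelectionNoPreSelect_ES",
    "autosklearnBBCEnsembleSelectionPreSelectInESRegularizedEnd",
    "autosklearnBBCEnsembleSelectionPreSelectInESRegularizedEnd_ES",
    "autosklearnBBCScoreEnsembleMAX",
    "autosklearnBBCScoreEnsembleMAX_ES",
    "autosklearnBBCScoreEnsembleMAXWinner",
    "autosklearnBBCScoreEnsembleMAXWinner_ES",
    "autosklearnBagging",
    "bagging"]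

theorem pv_sorted_eval :
    PySem.List.sorted pvMapping.keys (fun k => PySem.Str.len k) true = pvSortedKeys := by
  decide

theorem pvKeys_eval : pvMapping.keys = pvKeysList := by decide

-- A's loop is first-match-then-replace
theorem pvLoopA_find? (l : List String) (n : String) :
    pvLoopA l n =
      match l.find? (fun k => PySem.Str.isIn k n) with
      | some k => PySem.Str.replace n k (pvMapping.getD k "")
      | none => n := by
  induction l with
  | nil => rfl
  | cons k rest ih =>
    cases h : PySem.Str.isIn k n <;> simp only [pvLoopA, List.find?, h, ih] <;> simp

-- the running-max loop of B, with the match test abstracted into p and the length into key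
def pvF (p : String → Bool) (key : String → Int) (b : Option String) (l : List String) : Option String :=
  l.foldl (fun best k =>
    if p k &&
        (match best with
         | none => true
         | some x => decide (key x < key k))
    then some k else best) b

theorem pvF_cons (p : String → Bool) (key : String → Int) (b : Option String) (k : String) (l : List String) :
    pvF p key b (k :: l) =
      pvF p key
        (if p k &&
            (match b with
             | none => true
             | some x => decide (key x < key k))
         then some k else b) l := rfl

theorem pvF_append (p : String → Bool) (key : String → Int) (b : Option String) (l₁ l₂ : List String) :
    pvF p key b (l₁ ++ l₂) = pvF p key (pvF p key b l₁) l₂ := by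
  simp [pvF, List.foldl_append]

-- the accumulator is none-or-an-element-seen-so-far
theorem pvF_mem (p : String → Bool) (key : String → Int) (l : List String) :
    ∀ b : Option String, pvF p key b l = b ∨ ∃ k ∈ l, pvF p key b l = some k := by
  induction l with
  | nil => intro b; exact Or.inl rfl
  | cons k l ih =>
    intro b
    rw [pvF_cons]
    rcases ih (if p k && (match b with | none => true | some x => decide (key x < key k))
        then some k else b) with hfold | ⟨k', hk', hfold⟩
    · rw [hfold]
      split <;> split
      · exact Or.inr ⟨k, List.mem_cons_self, rfl⟩
      · exact Or.inl rfl
      · exact Or.inr ⟨k, List.mem_cons_self, rfl⟩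
      · exact Or.inl rfl
    · exact Or.inr ⟨k', List.mem_cons_of_mem _ hk', hfold⟩

-- once the accumulator holds a key no later key strictly exceeds, it never changes
theorem pvF_stay (p : String → Bool) (key : String → Int) (y : String) (l : List String)
    (h : ∀ k ∈ l, ¬ key y < key k) : pvF p key (some y) l = some y := by
  induction l with
  | nil => rfl
  | cons k l ih =>
    rw [pvF_cons]
    have hd : decide (key y < key k) = false := decide_eq_false (h k List.mem_cons_self)
    have hm : (match (some y : Option String) with
        | none => true
        | some x => decide (key x < key k)) = decide (key y < key k) := rfl
    rw [hm, hd]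
    simp only [Bool.and_false, Bool.false_eq_true, if_false]
    exact ih (fun k hk => h k (List.mem_cons_of_mem _ hk))

-- a key with p = false never changes the accumulator
theorem pvF_skip (p : String → Bool) (key : String → Int) (b : Option String)
    (y : String) (L R : List String) (hp : p y = false) :
    pvF p key b (L ++ y :: R) = pvF p key b (L ++ R) := by
  rw [pvF_append, pvF_append, pvF_cons, hp]
  simp

-- MAIN: the running max (strict improvement, first kept on ties) over ks equals the
-- first match in ys, provided ys is a permutation of ks that is non-increasing in key
-- and lists equal-key elements in ks-order (stability).
theorem pv_runmax_eq_find (p : String → Bool) (key : String → Int) :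
    ∀ (ys ks : List String), ys.Perm ks → ks.Nodup →
      ys.Pairwise (fun a b => key b ≤ key a) →
      ys.Pairwise (fun a b => key a = key b → [a, b].Sublist ks) →
      pvF p key none ks = ys.find? p := by
  intro ys
  induction ys with
  | nil =>
    intro ks hperm _ _ _
    rw [hperm.symm.eq_nil]
    rfl
  | cons y ys ih =>
    intro ks hperm hnodup hsort hstab
    have hy : y ∈ ks := hperm.subset List.mem_cons_self
    obtain ⟨L, R, rfl⟩ := List.append_of_mem hy
    have hnd := List.nodup_append.mp hnodup
    have hyL : y ∉ L := fun h => hnd.2.2 y h y List.mem_cons_self rfl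
    have hyR : y ∉ R := (List.nodup_cons.mp hnd.2.1).1
    have hperm' : ys.Perm (L ++ R) := (hperm.trans List.perm_middle).cons_inv
    have hyys : y ∉ ys := (List.nodup_cons.mp ((hperm.nodup_iff).mpr hnodup)).1
    have hsort' := List.pairwise_cons.mp hsort
    have hstab' := List.pairwise_cons.mp hstab
    by_cases hp : p y = true
    · -- y is the first match of ys and the final value of the running max
      have hfind : (y :: ys).find? p = some y := by simp [List.find?, hp]
      rw [hfind, pvF_append, pvF_cons]
      -- the step at y overwrites whatever the accumulator holds
      have hlt : ∀ k ∈ L, key k < key y := by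
        intro k hkL
        have hkys : k ∈ ys := hperm'.mem_iff.mpr (List.mem_append.mpr (Or.inl hkL))
        rcases lt_or_eq_of_le (hsort'.1 k hkys) with h | h
        · exact h
        · -- equal keys: stability says y comes before k in ks, impossible since k ∈ L
          exfalso
          have hsub : [y, k].Sublist (L ++ y :: R) := hstab'.1 k hkys h.symm
          obtain ⟨u, v, huv, hu, hv⟩ := List.sublist_append_iff.mp hsub
          cases u with
          | nil =>
            rw [List.nil_append] at huv
            rw [← huv] at hv
            cases hv with
            | cons _ h2 => exact hyR (h2.subset List.mem_cons_self)
            | cons₂ _ h2 =>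
              exact hnd.2.2 k hkL k
                (List.mem_cons_of_mem _ (h2.subset List.mem_cons_self)) rfl
          | cons a u' =>
            have hay : a = y := by
              have := congrArg (fun l => l.head?) huv
              simpa using this.symm
            exact hyL (hu.subset (hay ▸ List.mem_cons_self))
      have hstep :
          (if p y &&
              (match pvF p key none L with
               | none => true
               | some x => decide (key x < key y))
           then some y else pvF p key none L) = some y := by
        rcases pvF_mem p key L none with h | ⟨k, hkL, h⟩
        · rw [h, hp]; simp
        · rw [h, hp]
          simp [hlt k hkL]
      rw [hstep]
      exact pvF_stay p key y R (fun k hkR =>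
        not_lt_of_ge (hsort'.1 k (hperm'.mem_iff.mpr (List.mem_append.mpr (Or.inr hkR)))))
    · -- y matches nothing: drop it on both sides and recurse
      have hp' : p y = false := by simpa using hp
      have hfind : (y :: ys).find? p = ys.find? p := by simp [List.find?, hp']
      rw [hfind, pvF_skip p key none y L R hp']
      apply ih (L ++ R) hperm'
      · exact hnodup.sublist ((R.sublist_cons_self y).append_left L)
      · exact hsort'.2
      · refine List.Pairwise.imp_of_mem ?_ hstab'.2
        intro a b ha hb hab heq
        have hay : a ≠ y := fun h => hyys (h ▸ ha)
        have hby : b ≠ y := fun h => hyys (h ▸ hb)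
        have := (hab heq).erase y
        rwa [List.erase_of_not_mem
            (by simp only [List.mem_cons, List.not_mem_nil, or_false]
                exact fun h => h.elim (fun h => hay h.symm) (fun h => hby h.symm)),
          List.erase_append_right _ hyL, List.erase_cons_head] at this

-- ===== VERDICT (by name: the statement is the Claim_ definition above) =====
theorem beautify_node_name_spec : Claim_equal_beautify_node_name := by
  intro name separator _
  unfold Spec_beautify_node_name beautify_node_name beautify_node_name_alt
  have hb : pvBest name = pvSortedKeys.find? (fun k => PySem.Str.isIn k name) := by
    have h1 : pvBest name =
        pvF (fun k => PySem.Str.isIn k name) (fun k => PySem.Str.len k) none pvMapping.keys := rfl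
    rw [h1, pvKeys_eval]
    exact pv_runmax_eq_find _ _ pvSortedKeys pvKeysList (by decide) (by decide)
      (by decide) (by decide)
  rw [pv_sorted_eval, pvLoopA_find?, hb]
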